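-- pv_equiv track=rewrite | github.com/manmohanalla2/aisera | challenge1.py | three_percentage
-- ===== SOURCE A (Python) =====
-- def three_percentage(string):
--     counter = 0
--     value_holder = 0
--     result = False
--     for i in string:
--         if i.isdigit():
--             digit = int(i)
--             if digit + value_holder == 10:
--                 if counter != 3:
--                     return False
--                 result = True
--             value_holder = digit
--             counter = 0
--         elif i == '%':
--             counter = counter + 1
--     if result:
--         return True
--     return False
-- ===== SOURCE B (Python) =====
-- def three_percentage(string):
--     # Two-pass re-implementation: first reify the digits with the count of '%'
--     # seen since the previous digit, then scan consecutive digit pairs.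
--     digits = []
--     pct = 0
--     for ch in string:
--         if ch.isdigit():
--             digits.append((int(ch), pct))
--             pct = 0
--         elif ch == '%':
--             pct += 1
--     found = False
--     for (prev, _), (cur, p) in zip(digits, digits[1:]):
--         if prev + cur == 10:
--             if p != 3:
--                 return False
--             found = True
--     return found
-- ===== Notes on version B (the rewrite author's own statement) =====
-- stated objective: alternative
-- what changed: Replaces A's single-pass state machine (counter/value_holder/result carried through every character) with a two-pass decomposition: one pass reifies the digits paired with the count of percent characters since the previous digit, a second pass scans consecutive digit pairs for sum 10.
import Mathlib
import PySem

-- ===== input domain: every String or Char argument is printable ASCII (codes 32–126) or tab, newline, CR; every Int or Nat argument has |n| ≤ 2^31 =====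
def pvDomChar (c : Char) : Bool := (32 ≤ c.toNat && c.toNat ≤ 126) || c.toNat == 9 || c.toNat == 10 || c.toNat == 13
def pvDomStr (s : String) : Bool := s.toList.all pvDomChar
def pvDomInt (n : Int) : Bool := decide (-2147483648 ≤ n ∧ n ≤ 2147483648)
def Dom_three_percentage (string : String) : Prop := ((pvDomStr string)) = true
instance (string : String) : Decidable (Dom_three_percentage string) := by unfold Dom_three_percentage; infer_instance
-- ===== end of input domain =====

-- B is a two-pass decomposition (digit/percent reification, then a pair scan) of A's
-- one-pass state machine; same cost, proven to return the same Bool on every input.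

-- ===== PORT A =====
-- the for-loop of A with state (counter, value_holder, result); an early `return False`
-- is the immediate `false`
def pvLoopA : List Char → Int → Int → Bool → Bool
  | [], _, _, result => result
  | c :: cs, counter, value_holder, result =>
    if PySem.Chars.isdigit c then
      -- int(i) for a single digit character (exact: c is '0'..'9')
      let digit : Int := (c.toNat : Int) - 48
      if digit + value_holder == 10 then
        if counter != 3 then false
        else pvLoopA cs 0 digit true
      else pvLoopA cs 0 digit result
    else if c == '%' then pvLoopA cs (counter + 1) value_holder result
    else pvLoopA cs counter value_holder result

def three_percentage (string : String) : Bool :=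
  pvLoopA string.toList 0 0 false

-- ===== PORT B =====
-- first pass of B: list of (digit, percents since previous digit)
def pvScanB : List Char → Int → List (Int × Int)
  | [], _ => []
  | c :: cs, pct =>
    if PySem.Chars.isdigit c then ((c.toNat : Int) - 48, pct) :: pvScanB cs 0
    else if c == '%' then pvScanB cs (pct + 1)
    else pvScanB cs pct

-- second pass of B: the zip(digits, digits[1:]) loop, carrying `found`;
-- pvPairsB prev rest found processes the pairs (prev, rest.head), (rest.head, …), …
def pvPairsB : Int → List (Int × Int) → Bool → Bool
  | _, [], found => found
  | prev, (cur, p) :: rest, found =>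
    if prev + cur == 10 then
      if p != 3 then false
      else pvPairsB cur rest true
    else pvPairsB cur rest found

def three_percentage_alt (string : String) : Bool :=
  match pvScanB string.toList 0 with
  | [] => false
  | (d, _) :: rest => pvPairsB d rest false

-- ===== PRECONDITION & SPEC =====
def Spec_three_percentage (string : String) (out : Bool) : Prop := out = three_percentage_alt string
instance (string : String) (out : Bool) : Decidable (Spec_three_percentage string out) := by unfold Spec_three_percentage; infer_instance

-- ===== CLAIM (what is proved, stated in full; the proofs are below) =====
def Claim_equal_three_percentage : Prop := ∀ (string : String), Dom_three_percentage string → Spec_three_percentage string (three_percentage string)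

-- ===== LEMMAS AND PROOFS =====

-- A's loop from state (counter, vh, r) equals B's pair scan over the reified digits
lemma pvLoopA_eq_pairs (cs : List Char) :
    ∀ (counter value_holder : Int) (r : Bool),
      pvLoopA cs counter value_holder r =
        pvPairsB value_holder (pvScanB cs counter) r := by
  induction cs with
  | nil => intro _ _ _; rfl
  | cons c cs ih =>
    intro counter vh r
    by_cases hd : PySem.Chars.isdigit c
    · simp only [pvLoopA, pvScanB, hd, if_true, pvPairsB]
      have hc : ((c.toNat : Int) - 48) + vh = vh + ((c.toNat : Int) - 48) := by ring
      rw [hc]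
      by_cases hs : vh + ((c.toNat : Int) - 48) = 10
      · simp only [hs, beq_self_eq_true, if_true]
        by_cases hc3 : counter = 3
        · simp [hc3, ih]
        · simp [hc3]
      · simp [hs, ih]
    · by_cases hp : c = '%'
      · subst hp
        simp [pvLoopA, pvScanB, show PySem.Chars.isdigit '%' = false from rfl, ih]
      · simp [pvLoopA, pvScanB, hd, hp, ih]

-- every digit value produced by the first pass is < 10
lemma pvScanB_fst_lt (cs : List Char) :
    ∀ (pct : Int) (x : Int × Int), x ∈ pvScanB cs pct → x.1 < 10 := by
  induction cs with
  | nil => intro _ x hx; simp [pvScanB] at hx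
  | cons c cs ih =>
    intro pct x hx
    by_cases hd : PySem.Chars.isdigit c
    · simp only [pvScanB, hd, if_true, List.mem_cons] at hx
      rcases hx with h | h
      · subst h
        have : c.toNat ≤ 57 := by
          simp only [PySem.Chars.isdigit, Bool.and_eq_true, decide_eq_true_eq] at hd
          have h := hd.2
          rw [Char.le_def, UInt32.le_iff_toNat_le] at h
          exact_mod_cast h
        simp; omega
      · exact ih 0 x h
    · by_cases hp : c = '%'
      · simp only [pvScanB, hp] at hx; simp at hx; exact ih _ x hx
      · simp only [pvScanB, hd] at hx; simp [hp] at hx; exact ih _ x hx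

-- ===== VERDICT (by name: the statement is the Claim_ definition above) =====
theorem three_percentage_spec : Claim_equal_three_percentage := by
  intro s _
  unfold Spec_three_percentage three_percentage three_percentage_alt
  rw [pvLoopA_eq_pairs]
  cases h : pvScanB s.toList 0 with
  | nil => rfl
  | cons hd tl =>
    obtain ⟨d, p⟩ := hd
    have hlt : d < 10 := by
      have := pvScanB_fst_lt s.toList 0 (d, p) (by rw [h]; exact List.mem_cons_self ..)
      simpa using this
    simp only [pvPairsB]
    rw [if_neg (by simp; omega)]
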